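-- pv_equiv track=rewrite | github.com/PHGallo/MAC0110 | ep12.py | pontuacao
-- ===== SOURCE A (Python) =====
-- GAP = '_'
--
-- def pontuacao(m, d, g, s, t):
--     ''' (int, int, int str, str) -> int
--     RECEBE 3 inteiros não negativos `m`, `d`, e `g` e duas strings `s` e `t`
--     de mesmo tamanho com zero ou mais gaps representando fitas de DNA.
--
--     RETORNA a pontuação do alinhamento entre `s` e `t` calculada da seguinte
--     forma:
--
--        * duas letras iguais alinhadas contam m pontos,
--        * duas letras diferentes alinhadas contam −d pontos (subtrai d pontos) e
--        * uma letra alinhada com um gap ou dois gaps alinhados contam −g pontos.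
--
--     Exemplos:
--     In  [1]: pontuacao(5, 5, 3, 'T_CGTAC', 'ATCG___')
--     Out [1]: -7
--
--     In  [2]: pontuacao(1, 5, 3, 'T_CGTAC', 'ATCG___')
--     Out [2]: -15
--
--     In  [3]: pontuacao(5, 5, 3, 'T_CGTA', 'ATCG__')
--     Out [3]: -4
--     '''
--     n = len(s)
--     pontos = 0
--
--     for i in range(n):
--         if s[i] == t[i] and s[i] != GAP and t[i] != GAP:
--             pontos += m
--         elif s[i] != t[i] and s[i] != GAP and t[i] != GAP:
--             pontos -= d
--         else:
--             pontos -= g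
--
--     return pontos
-- ===== SOURCE B (Python) =====
-- GAP = '_'
--
-- def pontuacao(m, d, g, s, t):
--     pairs = list(zip(s, t))
--     gaps = sum(1 for a, b in pairs if a == GAP or b == GAP)
--     matches = sum(1 for a, b in pairs if a == b and a != GAP)
--     return m * matches - d * (len(pairs) - matches - gaps) - g * gaps
-- ===== Notes on version B (the rewrite author's own statement) =====
-- stated objective: alternative
-- what changed: B zips the two strings, counts gaps and matches as two category counts, and returns the closed form m*matches - d*mismatches - g*gaps instead of A's index loop accumulating a weighted score position by position.
import Mathlib
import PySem

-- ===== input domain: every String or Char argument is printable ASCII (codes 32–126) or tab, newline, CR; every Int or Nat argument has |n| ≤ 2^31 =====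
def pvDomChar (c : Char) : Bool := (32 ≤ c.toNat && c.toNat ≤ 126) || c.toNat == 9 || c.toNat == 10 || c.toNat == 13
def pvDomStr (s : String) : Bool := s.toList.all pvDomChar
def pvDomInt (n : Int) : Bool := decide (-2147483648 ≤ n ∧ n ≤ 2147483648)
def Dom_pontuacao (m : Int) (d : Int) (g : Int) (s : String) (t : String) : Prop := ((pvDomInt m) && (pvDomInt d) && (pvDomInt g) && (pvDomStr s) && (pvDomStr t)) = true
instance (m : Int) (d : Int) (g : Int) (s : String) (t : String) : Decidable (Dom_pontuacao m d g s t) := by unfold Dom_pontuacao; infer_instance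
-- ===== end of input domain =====

-- B replaces A's position-by-position weighted accumulation by counting gaps and matches over the
-- zipped strings and returning the closed form m*matches - d*mismatches - g*gaps (objective: alternative).

-- ===== PORT A =====
-- for i in range(len(s)): indexing s[i], t[i]; on i ≥ len(t) Python raises IndexError (excluded by Pre_;
-- the pyGetD default is never read inside Pre_).
def pontuacao (m : Int) (d : Int) (g : Int) (s : String) (t : String) : Int :=
  let n : Int := (s.toList.length : Int)
  (PySem.List.pyRange 0 n 1).foldl (fun pontos i =>
    let si := PySem.List.pyGetD s.toList i ' '
    let ti := PySem.List.pyGetD t.toList i ' '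
    if si == ti && si != '_' && ti != '_' then pontos + m
    else if si != ti && si != '_' && ti != '_' then pontos - d
    else pontos - g) 0

-- ===== PORT B =====
def pontuacao_alt (m : Int) (d : Int) (g : Int) (s : String) (t : String) : Int :=
  let pairs := s.toList.zip t.toList
  let gaps : Int := (pairs.countP (fun p => p.1 == '_' || p.2 == '_') : Int)
  let eq_cnt : Int := (pairs.countP (fun p => p.1 == p.2 && p.1 != '_') : Int)
  m * eq_cnt - d * ((pairs.length : Int) - eq_cnt - gaps) - g * gaps

-- ===== PRECONDITION & SPEC =====
-- Pre_ excludes exactly the inputs where A raises IndexError: len(t) < len(s).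
def Pre_pontuacao (m : Int) (d : Int) (g : Int) (s : String) (t : String) : Prop :=
  s.toList.length ≤ t.toList.length
instance (m : Int) (d : Int) (g : Int) (s : String) (t : String) : Decidable (Pre_pontuacao m d g s t) := by unfold Pre_pontuacao; infer_instance

def pvWitness_pontuacao : Int × Int × Int × String × String := (5, 5, 3, "T_CGTAC", "ATCG___")

def Spec_pontuacao (m : Int) (d : Int) (g : Int) (s : String) (t : String) (out : Int) : Prop := out = pontuacao_alt m d g s t
instance (m : Int) (d : Int) (g : Int) (s : String) (t : String) (out : Int) : Decidable (Spec_pontuacao m d g s t out) := by unfold Spec_pontuacao; infer_instance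

-- ===== CLAIM (what is proved, stated in full; the proofs are below) =====
def Claim_equal_pontuacao : Prop := ∀ (m : Int) (d : Int) (g : Int) (s : String) (t : String), Dom_pontuacao m d g s t → Pre_pontuacao m d g s t → Spec_pontuacao m d g s t (pontuacao m d g s t)

-- ===== LEMMAS AND PROOFS =====

-- The zipped fold with A's step function equals B's closed form.
lemma fold_zip_closed (m d g : Int) :
    ∀ (zs : List (Char × Char)) (acc : Int),
      zs.foldl (fun pontos p =>
        if p.1 == p.2 && p.1 != '_' && p.2 != '_' then pontos + m
        else if p.1 != p.2 && p.1 != '_' && p.2 != '_' then pontos - d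
        else pontos - g) acc
      = acc + m * (zs.countP (fun p => p.1 == p.2 && p.1 != '_') : Int)
          - d * ((zs.length : Int) - (zs.countP (fun p => p.1 == p.2 && p.1 != '_') : Int)
                 - (zs.countP (fun p => p.1 == '_' || p.2 == '_') : Int))
          - g * (zs.countP (fun p => p.1 == '_' || p.2 == '_') : Int) := by
  intro zs
  induction zs with
  | nil => intro acc; simp
  | cons p zs ih =>
    intro acc
    rw [List.foldl_cons, ih]
    obtain ⟨a, b⟩ := p
    by_cases h1 : a = '_' <;> by_cases h2 : b = '_' <;> by_cases h3 : a = b <;>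
      simp only [List.countP_cons, List.length_cons, h1, h2, h3] <;>
      simp_all <;> ring

theorem pontuacao_spec : Claim_equal_pontuacao := by
  intro m d g s t _ hpre
  unfold Spec_pontuacao pontuacao pontuacao_alt
  unfold Pre_pontuacao at hpre
  set ls := s.toList with hls
  set lt := t.toList with hlt
  set zs := ls.zip lt with hzs
  have hlen : zs.length = ls.length := by
    simp [hzs, List.length_zip]; omega
  -- turn A's index fold into a fold over the zipped list
  have hcong :
      (PySem.List.pyRange 0 (ls.length : Int) 1).foldl (fun pontos i =>
        let si := PySem.List.pyGetD ls i ' '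
        let ti := PySem.List.pyGetD lt i ' '
        if si == ti && si != '_' && ti != '_' then pontos + m
        else if si != ti && si != '_' && ti != '_' then pontos - d
        else pontos - g) 0
    = (PySem.List.pyRange 0 (PySem.List.len zs) 1).foldl (fun pontos i =>
        let p := PySem.List.pyGetD zs i (' ', ' ')
        if p.1 == p.2 && p.1 != '_' && p.2 != '_' then pontos + m
        else if p.1 != p.2 && p.1 != '_' && p.2 != '_' then pontos - d
        else pontos - g) 0 := by
    have hlen' : PySem.List.len zs = (ls.length : Int) := by
      simp [PySem.List.len_eq, hlen]
    rw [hlen']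
    apply PySem.List.foldl_congr_mem
    intro acc i hi
    have hib := (PySem.List.mem_pyRange_one).1 hi
    have hi0 : 0 ≤ i := hib.1
    have hisl : i < (ls.length : Int) := hib.2
    have hilt : i < (lt.length : Int) := by omega
    have hizs : i < (zs.length : Int) := by rw [hlen]; omega
    rw [PySem.List.pyGetD_eq_getElem ls ' ' hi0 (by simpa using hisl),
        PySem.List.pyGetD_eq_getElem lt ' ' hi0 hilt,
        PySem.List.pyGetD_eq_getElem zs (' ', ' ') hi0 hizs]
    rw [List.getElem_zip]
  rw [hcong, PySem.List.foldl_pyRange_zero_pyGetD zs (' ', ' ')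
        (fun pontos p =>
          if p.1 == p.2 && p.1 != '_' && p.2 != '_' then pontos + m
          else if p.1 != p.2 && p.1 != '_' && p.2 != '_' then pontos - d
          else pontos - g) 0]
  rw [fold_zip_closed]
  have hmcount : zs.countP (fun p => p.1 == p.2 && p.1 != '_')
      = zs.countP (fun p => p.1 == p.2 && p.1 != '_' && p.2 != '_') := by
    apply List.countP_congr
    intro p _
    by_cases h1 : p.1 = p.2 <;> by_cases h2 : p.1 = '_' <;> simp_all
  simp only [hmcount]
  ring
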